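-- pv_equiv track=rewrite | github.com/kimyoung9689/Coding_Test_Solutions | 백준/Gold/2447. 별 찍기 － 10/별 찍기 － 10.py | get_star
-- ===== SOURCE A (Python) =====
-- def get_star(n: int, r: int, c: int) -> str:
--     """
--     N x N 패턴에서 (r, c) 위치에 들어갈 문자를 반환합니다.
--
--     :param n: 현재 패턴의 크기 (N)
--     :param r: 현재 패턴 내 행 위치 (0 <= r < n)
--     :param c: 현재 패턴 내 열 위치 (0 <= c < n)
--     :return: '*' 또는 ' '
--     """
--     # **기저 조건 (N=1):** 가장 작은 단위에서는 별을 반환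
--     if n == 1:
--         return '*'
--
--     # **현재 단계의 중앙 확인:**
--     # 9등분 했을 때 중앙 (1, 1) 영역인지 확인 (r/3, c/3이 모두 1인 경우)
--     third: int = n // 3
--     if third <= r < third * 2 and third <= c < third * 2:
--         return ' ' # 중앙 블록은 공백
--     else:
--         # **재귀 호출:**
--         # 중앙이 아니면 다음 단계(N/3)의 (r%third, c%third) 위치를 확인
--         return get_star(third, r % third, c % third)
-- ===== SOURCE B (Python) =====
-- def get_star(n: int, r: int, c: int) -> str:
--     # Iterative descent through the base-3 levels: no recursion, constant state (n, r, c).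
--     while n > 1:
--         third = n // 3
--         if r // third == 1 and c // third == 1:
--             return ' '
--         n, r, c = third, r % third, c % third
--     return '*'
-- ===== Notes on version B (the rewrite author's own statement) =====
-- stated objective: alternative
-- what changed: Replaced the recursive descent with an iterative while-loop that keeps (n, r, c) as mutable state and tests the central block via a single floor division per coordinate instead of a two-sided range comparison.
-- outside the precondition, e.g. on get_star(6, 2, 2): A returns ' ', B returns ' '
import Mathlib
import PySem

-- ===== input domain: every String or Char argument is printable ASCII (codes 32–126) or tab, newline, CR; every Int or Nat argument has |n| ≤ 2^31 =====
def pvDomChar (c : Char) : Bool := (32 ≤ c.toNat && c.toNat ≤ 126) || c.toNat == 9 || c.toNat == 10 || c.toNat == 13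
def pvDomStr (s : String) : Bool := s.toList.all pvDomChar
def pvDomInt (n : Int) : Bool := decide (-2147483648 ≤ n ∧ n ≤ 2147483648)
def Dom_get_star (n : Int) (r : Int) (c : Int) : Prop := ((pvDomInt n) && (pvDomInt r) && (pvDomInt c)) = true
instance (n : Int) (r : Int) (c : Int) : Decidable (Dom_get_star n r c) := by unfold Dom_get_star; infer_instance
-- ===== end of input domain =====

-- B is an iterative (loop-state) rewrite of A's recursion; equivalence is proved on Pre_, the inputs where A returns.

-- ===== PORT A =====
-- A's recursion diverges (RecursionError) for n < 0 and divides by zero when the n // 3 chain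
-- hits 2 or 0, so the Lean port carries a fuel counter for totality; fuel 64 is never exhausted
-- on Pre_ inputs (|n| ≤ 2^31 < 3^64). Each step is a literal transliteration of A's body.
def get_starFuel : Nat → Int → Int → Int → String
  | 0, _, _, _ => "*"
  | fuel + 1, n, r, c =>
    if n = 1 then "*"
    else
      let third := PySem.Int.floordiv n 3
      if third ≤ r ∧ r < third * 2 ∧ third ≤ c ∧ c < third * 2 then " "
      else get_starFuel fuel third (PySem.Int.mod r third) (PySem.Int.mod c third)

def get_star (n : Int) (r : Int) (c : Int) : String := get_starFuel 64 n r c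

-- ===== PORT B =====
-- B's while-loop as tail recursion on the shrinking n.
def get_star_alt (n : Int) (r : Int) (c : Int) : String :=
  if _h : 1 < n then
    let third := PySem.Int.floordiv n 3
    if PySem.Int.floordiv r third = 1 ∧ PySem.Int.floordiv c third = 1 then " "
    else get_star_alt third (PySem.Int.mod r third) (PySem.Int.mod c third)
  else "*"
termination_by n.toNat
decreasing_by
  simp only [PySem.Int.floordiv_eq_ediv_of_pos (by norm_num : (0:Int) < 3)]
  omega

-- ===== PRECONDITION & SPEC =====
-- Pre_ excludes n ≤ 0 and every n whose floor-division chain n // 3^k hits 2: on such n A raises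
-- ZeroDivisionError whenever the recursion reaches that level, and only positions already caught by
-- an earlier central-block check still return (there A and B agree anyway, e.g. (6, 2, 2) → ' ').
-- k < 21 suffices since |n| ≤ 2^31 < 3^20.
def Pre_get_star (n : Int) (r : Int) (c : Int) : Prop :=
  1 ≤ n ∧ ∀ k : Nat, k < 21 → n / (3 ^ k : Int) ≠ 2
instance (n : Int) (r : Int) (c : Int) : Decidable (Pre_get_star n r c) := by
  unfold Pre_get_star; infer_instance
def pvWitness_get_star : Int × Int × Int := (27, 13, 4)


def Spec_get_star (n : Int) (r : Int) (c : Int) (out : String) : Prop := out = get_star_alt n r c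
instance (n : Int) (r : Int) (c : Int) (out : String) : Decidable (Spec_get_star n r c out) := by unfold Spec_get_star; infer_instance

-- ===== CLAIM (what is proved, stated in full; the proofs are below) =====
def Claim_equal_get_star : Prop := ∀ (n : Int) (r : Int) (c : Int), Dom_get_star n r c → Pre_get_star n r c → Spec_get_star n r c (get_star n r c)

-- ===== LEMMAS AND PROOFS =====

-- Main invariant: with enough fuel (n.toNat < 3 ^ fuel), A's port equals B's port on Pre_ inputs.
lemma get_star_fuel_eq_alt (fuel : Nat) :
    ∀ (n r c : Int), n.toNat < 3 ^ fuel → n ≤ 2147483648 → 1 ≤ n →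
      (∀ k : Nat, k < 21 → n / (3 ^ k : Int) ≠ 2) →
      get_starFuel fuel n r c = get_star_alt n r c := by
  induction fuel with
  | zero => intro n r c hf _ h1 _; omega
  | succ fuel ih =>
    intro n r c hf hb h1 hch
    by_cases hn1 : n = 1
    · subst hn1
      rw [get_star_alt]
      simp [get_starFuel]
    · have hn2 : n ≠ 2 := by
        have := hch 0 (by norm_num); simpa using this
      have h3 : 3 ≤ n := by omega
      have hthird : PySem.Int.floordiv n 3 = n / 3 :=
        PySem.Int.floordiv_eq_ediv_of_pos (by norm_num)
      have hthpos : (0:Int) < n / 3 := by omega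
      have hcond : (PySem.Int.floordiv r (n / 3) = 1 ∧ PySem.Int.floordiv c (n / 3) = 1)
          ↔ (n / 3 ≤ r ∧ r < n / 3 * 2 ∧ n / 3 ≤ c ∧ c < n / 3 * 2) := by
        rw [PySem.Int.floordiv_eq_iff_of_pos hthpos, PySem.Int.floordiv_eq_iff_of_pos hthpos]
        constructor <;> intro h <;> constructor <;> try constructor
        all_goals omega
      rw [get_star_alt]
      simp only [get_starFuel, hthird, if_neg hn1]
      rw [dif_pos (by omega : 1 < n)]
      by_cases hc : n / 3 ≤ r ∧ r < n / 3 * 2 ∧ n / 3 ≤ c ∧ c < n / 3 * 2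
      · rw [if_pos hc, if_pos (hcond.mpr hc)]
      · rw [if_neg hc, if_neg (fun h => hc (hcond.mp h))]
        apply ih
        · omega
        · omega
        · omega
        · intro k hk
          rcases Nat.lt_or_ge k 20 with hk20 | hk20
          · have := hch (k + 1) (by omega)
            rw [Int.ediv_ediv_of_nonneg (by norm_num : (0:Int) ≤ 3)]
            rw [show (3:Int) * 3 ^ k = 3 ^ (k + 1) by ring]
            exact this
          · have hk' : k = 20 := by omega
            subst hk'
            have : n / 3 / (3 ^ 20 : Int) = 0 := by
              apply Int.ediv_eq_zero_of_lt (by omega)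
              omega
            omega

-- ===== VERDICT (by name: the statement is the Claim_ definition above) =====
theorem get_star_spec : Claim_equal_get_star := by
  intro n r c hdom hpre
  unfold Spec_get_star get_star
  apply get_star_fuel_eq_alt
  · have : n ≤ 2147483648 := by
      simp [Dom_get_star, pvDomInt] at hdom; omega
    have : (3:Nat) ^ 64 = 3433683820292512484657849089281 := by norm_num
    omega
  · simp [Dom_get_star, pvDomInt] at hdom; omega
  · exact hpre.1
  · exact hpre.2
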